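-- pv_equiv track=rewrite | github.com/seth-25/langchain-ChatGLM | server/knowledge_base/kb_service/utils.py | merge_ids
-- ===== SOURCE A (Python) =====
-- def merge_ids(id_set):
--     """ 连续的id分在一起，成为一个id seq """
--     id_list = sorted(list(id_set))
--
--     id_seqs = []  # 存一个个连续的id seq
--     id_seq = [id_list[0]]
--     for i in range(1, len(id_list)):
--         if id_list[i - 1] + 1 == id_list[i]:
--             id_seq.append(id_list[i])
--         else:
--             id_seqs.append(id_seq)
--             id_seq = [id_list[i]]
--     id_seqs.append(id_seq)
--     return id_seqs
-- ===== SOURCE B (Python) =====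
-- from itertools import groupby
--
--
-- def merge_ids(id_set):
--     """ 连续的id分在一起，成为一个id seq """
--     id_list = sorted(id_set)
--     return [[v for _, v in g]
--             for _, g in groupby(enumerate(id_list), key=lambda p: p[1] - p[0])]
-- ===== Notes on version B (the rewrite author's own statement) =====
-- stated objective: idiomatic
-- what changed: Replaces the explicit index loop with mutable run-accumulator state by itertools.groupby over enumerate(sorted ids) keyed on value-minus-index, which groups each consecutive run in one expression; on the empty input A raises IndexError (id_list[0]) while B naturally returns [].
-- outside the precondition, e.g. on merge_ids(set()): A raises IndexError, B returns []
import Mathlib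
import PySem

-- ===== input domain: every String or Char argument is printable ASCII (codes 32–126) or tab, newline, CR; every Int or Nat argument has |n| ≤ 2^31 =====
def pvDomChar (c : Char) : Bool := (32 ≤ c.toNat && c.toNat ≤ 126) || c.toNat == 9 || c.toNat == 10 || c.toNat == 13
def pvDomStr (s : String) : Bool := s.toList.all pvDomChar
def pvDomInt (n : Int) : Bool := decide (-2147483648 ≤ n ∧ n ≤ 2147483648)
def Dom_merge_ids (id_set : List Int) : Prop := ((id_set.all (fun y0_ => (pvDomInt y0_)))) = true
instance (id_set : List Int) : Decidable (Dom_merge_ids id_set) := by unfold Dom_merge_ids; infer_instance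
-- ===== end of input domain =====

-- B replaces A's index loop with mutable run-accumulator state by grouping enumerate(sorted ids)
-- on the key value-minus-index (itertools.groupby style): more idiomatic, same O(n log n) cost.
-- On the empty input A raises IndexError (so Pre_ excludes it); B there returns [].

-- ===== PORT A =====
def merge_ids (id_set : List Int) : List (List Int) :=
  let id_list := PySem.List.sorted id_set (fun x => x) false
  -- id_list[0]: Pre_merge_ids excludes the empty input, on which Python raises IndexError;
  -- inside the loop the indices i-1, i are always in range, so pyGetD is exact there.
  let st := (PySem.List.pyRange 1 (id_list.length : Int) 1).foldl
    (fun (st : List (List Int) × List Int) i =>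
      if PySem.List.pyGetD id_list (i - 1) 0 + 1 = PySem.List.pyGetD id_list i 0 then
        (st.1, st.2 ++ [PySem.List.pyGetD id_list i 0])
      else
        (st.1 ++ [st.2], [PySem.List.pyGetD id_list i 0]))
    ([], [PySem.List.pyGetD id_list 0 0])
  st.1 ++ [st.2]

-- ===== PORT B =====
-- itertools.groupby with key p.2 - p.1: consecutive pairs with equal keys share one group.
def pvGroupBy (ps : List (Int × Int)) : List (List (Int × Int)) :=
  match ps with
  | [] => []
  | x :: xs =>
    match pvGroupBy xs with
    | [] => [[x]]
    | [] :: gs => [x] :: gs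
    | (y :: g) :: gs =>
      if x.2 - x.1 = y.2 - y.1 then (x :: y :: g) :: gs else [x] :: (y :: g) :: gs

def merge_ids_alt (id_set : List Int) : List (List Int) :=
  let id_list := PySem.List.sorted id_set (fun x => x) false
  (pvGroupBy (PySem.List.enumerate id_list 0)).map (fun g => g.map (fun p => p.2))

-- ===== PRECONDITION & SPEC =====
-- Pre_ excludes exactly the empty input, on which Python A raises IndexError (id_list[0]).
def Pre_merge_ids (id_set : List Int) : Prop := id_set ≠ []
instance (id_set : List Int) : Decidable (Pre_merge_ids id_set) := by unfold Pre_merge_ids; infer_instance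

def pvWitness_merge_ids : List Int := [3, 1, 2, 7]

def Spec_merge_ids (id_set : List Int) (out : List (List Int)) : Prop := out = merge_ids_alt id_set
instance (id_set : List Int) (out : List (List Int)) : Decidable (Spec_merge_ids id_set out) := by unfold Spec_merge_ids; infer_instance

-- ===== CLAIM (what is proved, stated in full; the proofs are below) =====
def Claim_equal_merge_ids : Prop := ∀ (id_set : List Int), Dom_merge_ids id_set → Pre_merge_ids id_set → Spec_merge_ids id_set (merge_ids id_set)

-- ===== LEMMAS AND PROOFS =====

-- A's loop body as a function of (state, previous element, current element).
def pvG (st : List (List Int) × List Int) (p c : Int) : List (List Int) × List Int :=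
  if p + 1 = c then (st.1, st.2 ++ [c]) else (st.1 ++ [st.2], [c])

-- structural fold over adjacent pairs, carrying the previous element
def pvAdjFold {σ : Type} (g : σ → Int → Int → σ) : Int → List Int → σ → σ
  | _, [], st => st
  | x, y :: ys, st => pvAdjFold g y ys (g st x y)

-- reference: first run starting at x, and the remaining runs
def pvRuns (x : Int) : List Int → List Int × List (List Int)
  | [] => ([x], [])
  | y :: ys =>
    let p := pvRuns y ys
    if x + 1 = y then (x :: p.1, p.2) else ([x], p.1 :: p.2)

lemma pvRuns_fst_head (x : Int) (xs : List Int) :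
    (pvRuns x xs).1 = x :: (pvRuns x xs).1.tail := by
  cases xs with
  | nil => simp [pvRuns]
  | cons y ys => simp only [pvRuns]; split <;> simp

lemma pvFold_index' {σ : Type} (g : σ → Int → Int → σ) :
    ∀ (xs : List Int) (x : Int) (st : σ),
    (List.range xs.length).foldl
      (fun (st : σ) (k : Nat) => g st (PySem.List.pyGetD (x :: xs) (1 + (k : Int) - 1) 0)
                        (PySem.List.pyGetD (x :: xs) (1 + (k : Int)) 0)) st
    = pvAdjFold g x xs st := by
  intro xs
  induction xs with
  | nil => intro x st; simp [pvAdjFold]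
  | cons y ys ih =>
    intro x st
    rw [List.length_cons, List.range_succ_eq_map, List.foldl_cons, List.foldl_map]
    have h0 : g st (PySem.List.pyGetD (x :: y :: ys) (1 + ((0 : Nat) : Int) - 1) 0)
                   (PySem.List.pyGetD (x :: y :: ys) (1 + ((0 : Nat) : Int)) 0) = g st x y := by
      norm_num
      rw [show (1 : Int) = ((1 : Nat) : Int) from rfl, PySem.List.pyGetD_natCast]
      simp
    have hfun : (fun (st : σ) (k : Nat) =>
          g st (PySem.List.pyGetD (x :: y :: ys) (1 + ((Nat.succ k : Nat) : Int) - 1) 0)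
               (PySem.List.pyGetD (x :: y :: ys) (1 + ((Nat.succ k : Nat) : Int)) 0))
        = (fun (st : σ) (k : Nat) =>
          g st (PySem.List.pyGetD (y :: ys) (1 + (k : Int) - 1) 0)
               (PySem.List.pyGetD (y :: ys) (1 + (k : Int)) 0)) := by
      funext st k
      have e1 : (1 + ((Nat.succ k : Nat) : Int) - 1) = ((k + 1 : Nat) : Int) := by push_cast; ring
      have e2 : (1 + ((Nat.succ k : Nat) : Int)) = ((k + 2 : Nat) : Int) := by push_cast; ring
      have e3 : (1 + (k : Int) - 1) = ((k : Nat) : Int) := by ring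
      have e4 : (1 + (k : Int)) = ((k + 1 : Nat) : Int) := by push_cast; ring
      rw [e1, e2, e3, e4, PySem.List.pyGetD_natCast, PySem.List.pyGetD_natCast,
          PySem.List.pyGetD_natCast, PySem.List.pyGetD_natCast]
      simp [List.getD]
    rw [h0, hfun, ih y (g st x y)]
    rfl

lemma pvA_runs : ∀ (xs : List Int) (x : Int) (S : List (List Int)) (s : List Int),
    (pvAdjFold pvG x xs (S, s)).1 ++ [(pvAdjFold pvG x xs (S, s)).2]
    = S ++ ((s ++ (pvRuns x xs).1.tail) :: (pvRuns x xs).2) := by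
  intro xs
  induction xs with
  | nil => intro x S s; simp [pvAdjFold, pvRuns]
  | cons y ys ih =>
    intro x S s
    by_cases h : x + 1 = y
    · have : pvAdjFold pvG x (y :: ys) (S, s) = pvAdjFold pvG y ys (S, s ++ [y]) := by
        simp [pvAdjFold, pvG, h]
      rw [this, ih y S (s ++ [y])]
      have hr := pvRuns_fst_head y ys
      simp only [pvRuns, h]
      rw [hr]
      simp
    · have : pvAdjFold pvG x (y :: ys) (S, s) = pvAdjFold pvG y ys (S ++ [s], [y]) := by
        simp [pvAdjFold, pvG, h]
      rw [this, ih y (S ++ [s]) [y]]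
      have hr := pvRuns_fst_head y ys
      simp only [pvRuns, h]
      conv_rhs => rw [hr]
      simp
  
lemma pvGroupBy_head : ∀ (ps : List (Int × Int)) (p : Int × Int),
    ∃ g gs, pvGroupBy (p :: ps) = (p :: g) :: gs := by
  intro ps
  induction ps with
  | nil => intro p; exact ⟨[], [], rfl⟩
  | cons q qs ih =>
    intro p
    obtain ⟨g, gs, hg⟩ := ih q
    rw [show pvGroupBy (p :: q :: qs) = (match pvGroupBy (q :: qs) with
      | [] => [[p]]
      | [] :: gs => [p] :: gs
      | (y :: g) :: gs =>
        if p.2 - p.1 = y.2 - y.1 then (p :: y :: g) :: gs else [p] :: (y :: g) :: gs) from rfl, hg]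
    by_cases h : p.2 - p.1 = q.2 - q.1
    · exact ⟨q :: g, gs, by simp [h]⟩
    · exact ⟨[], (q :: g) :: gs, by simp [h]⟩

lemma pvB_runs : ∀ (xs : List Int) (x : Int) (i : Int),
    (pvGroupBy (PySem.List.enumerate (x :: xs) i)).map (fun g => g.map (fun p => p.2))
    = (pvRuns x xs).1 :: (pvRuns x xs).2 := by
  intro xs
  induction xs with
  | nil =>
    intro x i
    simp [PySem.List.enumerate_cons, PySem.List.enumerate_nil, pvGroupBy, pvRuns]
  | cons y ys ih =>
    intro x i
    obtain ⟨g, gs, hg⟩ := pvGroupBy_head (PySem.List.enumerate ys (i + 1 + 1)) (i + 1, y)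
    have hIH := ih y (i + 1)
    rw [PySem.List.enumerate_cons] at hIH
    rw [PySem.List.enumerate_cons, PySem.List.enumerate_cons]
    rw [hg] at hIH
    rw [show pvGroupBy ((i, x) :: (i + 1, y) :: PySem.List.enumerate ys (i + 1 + 1))
        = (match pvGroupBy ((i + 1, y) :: PySem.List.enumerate ys (i + 1 + 1)) with
          | [] => [[(i, x)]]
          | [] :: gs => [(i, x)] :: gs
          | (z :: g) :: gs =>
            if (i, x).2 - (i, x).1 = z.2 - z.1 then ((i, x) :: z :: g) :: gs
            else [(i, x)] :: (z :: g) :: gs) from rfl, hg]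
    dsimp only
    simp only [List.map_cons, List.cons.injEq] at hIH
    obtain ⟨hr1, hr2⟩ := hIH
    by_cases h : x + 1 = y
    · rw [if_pos (show x - i = y - (i + 1) by omega)]
      have hx : pvRuns x (y :: ys) = (x :: (pvRuns y ys).1, (pvRuns y ys).2) := by
        simp [pvRuns, h]
      rw [hx]
      simp only [List.map_cons]
      rw [← hr1, ← hr2]
    · rw [if_neg (show ¬ x - i = y - (i + 1) by omega)]
      have hx : pvRuns x (y :: ys) = ([x], (pvRuns y ys).1 :: (pvRuns y ys).2) := by
        simp [pvRuns, h]
      rw [hx]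
      simp only [List.map_cons]
      rw [← hr1, ← hr2]
      simp

lemma pv_main (id_set : List Int) (h : id_set ≠ []) :
    merge_ids id_set = merge_ids_alt id_set := by
  have hl : PySem.List.sorted id_set (fun x => x) false ≠ [] := by
    intro he
    have hlen := (PySem.List.sorted_perm id_set (fun x => x) false).length_eq
    rw [he] at hlen
    exact h (List.eq_nil_of_length_eq_zero hlen.symm)
  obtain ⟨x, xs, hxx⟩ := List.exists_cons_of_ne_nil hl
  simp only [merge_ids, merge_ids_alt]
  rw [hxx]
  -- B side
  rw [pvB_runs xs x 0]
  -- A side: turn the index fold into the adjacent-pair fold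
  have hfold := pvFold_index' pvG xs x (([] : List (List Int)), [x])
  simp only [pvG] at hfold
  rw [List.length_cons, PySem.List.pyRange_one]
  have hn : (((xs.length + 1 : Nat) : Int) - 1).toNat = xs.length := by omega
  rw [hn, List.foldl_map, PySem.List.pyGetD_zero_cons, hfold]
  have hA := pvA_runs xs x [] [x]
  rw [hA]
  rw [pvRuns_fst_head x xs]
  simp

-- ===== VERDICT (by name: the statement is the Claim_ definition above) =====
theorem merge_ids_spec : Claim_equal_merge_ids := by
  intro id_set _ hpre
  unfold Spec_merge_ids
  exact pv_main id_set hpre
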